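-- pv_equiv track=rewrite | github.com/jack7141/Neural-note | utils/calculator.py | next_code
-- ===== SOURCE A (Python) =====
-- import string
--
-- def base26_add(num1, num2):
--     digits = string.ascii_uppercase
--     limit = len(digits)
--
--     # 숫자를 리스트로 변환 (역순으로 계산하기 쉽게)
--     num1 = list(num1[::-1])
--     num2 = list(num2[::-1])
--
--     # 결과를 저장할 리스트
--     result = []
--     carry = 0
--     max_len = max(len(num1), len(num2))
--
--     for i in range(max_len):
--         # num1과 num2의 해당 자리가 존재하지 않으면 0으로 취급
--         digit1 = digits.index(num1[i]) if i < len(num1) else 0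
--         digit2 = digits.index(num2[i]) if i < len(num2) else 0
--
--         # 두 자릿수 더하기 + carry
--         total = digit1 + digit2 + carry
--
--         # 현재 자릿수 값과 carry 값 계산
--         result.append(digits[total % limit])
--         carry = total // limit
--
--     # 마지막 carry가 남아있으면 추가
--     if carry:
--         result.append(digits[carry])
--
--     # 결과를 다시 역순으로 뒤집어서 반환
--     return result[::-1]
--
-- def next_code(before):
--     c = list(before)
--     c.reverse()
--     n_arr = list()
--     carry = 'B'
--     for i, v in enumerate(c):
--         _sum = base26_add(carry, v)
--         if len(_sum) > 1:
--             carry = _sum.pop(0)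
--             pass
--         else:
--             carry = 'A'
--             pass
--         n_arr.append(_sum[-1])
--         if carry == 'B' and i == len(c) - 1:
--             n_arr.append('A')
--             pass
--
--     n_arr.reverse()
--     return ''.join(n_arr)
-- ===== SOURCE B (Python) =====
-- import string
--
-- def next_code(before):
--     # Decode once to digit values (raises ValueError on any non-A..Z char, like A).
--     vals = [string.ascii_uppercase.index(ch) for ch in before]
--     if not vals:
--         return ''
--     i = len(vals) - 1
--     while i >= 0 and vals[i] == 25:
--         vals[i] = 0
--         i -= 1
--     if i >= 0:
--         vals[i] += 1
--         return ''.join(string.ascii_uppercase[v] for v in vals)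
--     # all 'Z': reproduce A's overflow behaviour 'A' + 'AA...A'
--     return 'A' + ''.join(string.ascii_uppercase[v] for v in vals)
-- ===== Notes on version B (the rewrite author's own statement) =====
-- stated objective: simpler
-- what changed: B decodes the string once into digit values, zeroes the trailing 25s from the right, increments the first non-25 digit and re-encodes, instead of A's per-character base26_add string addition with an enumerated carry-letter loop over the whole reversed string.
import Mathlib
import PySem

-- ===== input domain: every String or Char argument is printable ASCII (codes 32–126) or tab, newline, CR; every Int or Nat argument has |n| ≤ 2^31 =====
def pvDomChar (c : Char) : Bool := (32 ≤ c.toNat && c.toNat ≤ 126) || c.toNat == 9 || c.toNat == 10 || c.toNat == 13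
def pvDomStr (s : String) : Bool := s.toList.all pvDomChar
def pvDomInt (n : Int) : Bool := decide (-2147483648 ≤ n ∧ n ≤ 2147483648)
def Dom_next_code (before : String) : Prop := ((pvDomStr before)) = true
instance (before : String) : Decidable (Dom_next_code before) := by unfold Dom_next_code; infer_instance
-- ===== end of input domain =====

-- B replaces A's per-character base26_add string addition with a decode / bump-trailing-25s / re-encode
-- pass: simpler decomposition, same O(n) cost.

-- string.ascii_uppercase (shared constant)
def pvDigits : List Char :=
  ['A','B','C','D','E','F','G','H','I','J','K','L','M',
   'N','O','P','Q','R','S','T','U','V','W','X','Y','Z']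

-- ===== PORT A =====
-- base26_add: literal transliteration ('digits.index' raises on a char outside A-Z;
-- ported with index?.getD 0 — Pre_next_code excludes those inputs)
def base26_add (num1 num2 : List Char) : List Char :=
  let digits := pvDigits
  let limit : Int := (digits.length : Int)
  let n1 := num1.reverse      -- list(num1[::-1])
  let n2 := num2.reverse      -- list(num2[::-1])
  let maxLen := max n1.length n2.length
  let st := (List.range maxLen).foldl (fun (st : List Char × Int) i =>
    let result := st.1
    let carry := st.2
    let digit1 : Int := if i < n1.length then (((PySem.List.index? digits (n1.getD i 'A')).getD 0 : Nat) : Int) else 0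
    let digit2 : Int := if i < n2.length then (((PySem.List.index? digits (n2.getD i 'A')).getD 0 : Nat) : Int) else 0
    let total := digit1 + digit2 + carry
    (result ++ [(PySem.List.pyGet? digits (PySem.Int.mod total limit)).getD 'A'],
     PySem.Int.floordiv total limit)) ([], 0)
  let result := if st.2 ≠ 0 then st.1 ++ [(PySem.List.pyGet? digits st.2).getD 'A'] else st.1
  result.reverse

-- the body of A's 'for i, v in enumerate(c)' loop (L = len(c))
def stepA (L : Nat) (st : List Char × Char) (iv : Int × Char) : List Char × Char :=
  let n_arr := st.1
  let carry := st.2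
  let i := iv.1
  let v := iv.2
  let sum := base26_add [carry] [v]
  let cs : Char × List Char :=
    if sum.length > 1 then ((PySem.List.pyGet? sum 0).getD 'A', sum.drop 1)  -- carry = _sum.pop(0)
    else ('A', sum)
  let carry2 := cs.1
  let sum2 := cs.2
  let n_arr2 := n_arr ++ [(PySem.List.pyGet? sum2 (-1)).getD 'A']           -- n_arr.append(_sum[-1])
  let n_arr3 := if carry2 = 'B' ∧ i = (L : Int) - 1 then n_arr2 ++ ['A'] else n_arr2
  (n_arr3, carry2)

def next_code (before : String) : String :=
  let c := before.toList.reverse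
  let st := (PySem.List.enumerate c).foldl (stepA c.length) ([], 'B')
  String.mk st.1.reverse

-- ===== PORT B =====
-- vals decode ('.index' raises outside A-Z; ported with getD 0, excluded by Pre_next_code)
def pvDec (ch : Char) : Nat := (PySem.List.index? pvDigits ch).getD 0

def pvEnc (v : Nat) : Char := pvDigits.getD v 'A'

def pvEncode (vals : List Nat) : List Char := vals.map pvEnc

-- the while loop over the values from the right: zero trailing 25s, bump the first non-25;
-- the flag records whether a non-25 digit was found
def pvBump : List Nat → List Nat × Bool
  | [] => ([], false)
  | v :: rest =>
    if v = 25 then (0 :: (pvBump rest).1, (pvBump rest).2)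
    else ((v + 1) :: rest, true)

def next_code_alt (before : String) : String :=
  let vals := before.toList.map pvDec
  if vals.isEmpty then "" else
    let p := pvBump vals.reverse
    if p.2 then String.mk (pvEncode p.1.reverse)
    else String.mk ('A' :: pvEncode p.1.reverse)   -- all 'Z': A's overflow quirk 'A' + 'AA…A'

-- ===== PRECONDITION & SPEC =====
-- Pre_ excludes exactly the strings containing a char outside A-Z, on which A raises ValueError.
def Pre_next_code (before : String) : Prop :=
  before.toList.all (fun ch => 'A' ≤ ch && ch ≤ 'Z') = true
instance (before : String) : Decidable (Pre_next_code before) := by unfold Pre_next_code; infer_instance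

def pvWitness_next_code : String := "AZ"

def Spec_next_code (before : String) (out : String) : Prop := out = next_code_alt before
instance (before : String) (out : String) : Decidable (Spec_next_code before out) := by unfold Spec_next_code; infer_instance

-- ===== CLAIM (what is proved, stated in full; the proofs are below) =====
def Claim_equal_next_code : Prop := ∀ (before : String), Dom_next_code before → Pre_next_code before → Spec_next_code before (next_code before)

-- ===== LEMMAS AND PROOFS =====

-- abstract single-pass carry run (proof device relating both ports)
def pvRun : Char → List Char → List Char × Char
  | carry, [] => ([], carry)
  | carry, v :: rest =>
    if carry = 'B' then
      if v = 'Z' then ('A' :: (pvRun 'B' rest).1, (pvRun 'B' rest).2)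
      else (pvEnc (pvDec v + 1) :: (pvRun 'A' rest).1, (pvRun 'A' rest).2)
    else (v :: (pvRun 'A' rest).1, (pvRun 'A' rest).2)

lemma pvRun_A (l : List Char) : pvRun 'A' l = (l, 'A') := by
  induction l with
  | nil => rfl
  | cons v rest ih => simp [pvRun, ih]

lemma pvRun_carry (c : Char) (l : List Char) : (pvRun c l).2 = c ∨ (pvRun c l).2 = 'A' := by
  induction l generalizing c with
  | nil => left; rfl
  | cons v rest ih =>
    by_cases hc : c = 'B'
    · by_cases hz : v = 'Z'
      · simpa [pvRun, hc, hz] using (ih 'B').imp (fun h => hc ▸ h) id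
      · simp [pvRun, hc, hz, pvRun_A]
    · simp [pvRun, hc, pvRun_A]

lemma mem_pvDigits_of_range (ch : Char) (h1 : 'A' ≤ ch) (h2 : ch ≤ 'Z') : ch ∈ pvDigits := by
  have hn1 : 65 ≤ ch.toNat := h1
  have hn2 : ch.toNat ≤ 90 := h2
  have he : ch = Char.ofNat ch.toNat := (Char.ofNat_toNat ch).symm
  interval_cases h : ch.toNat <;> rw [he] <;> decide

lemma char_add_A : ∀ v ∈ pvDigits, base26_add ['A'] [v] = [v] := by
  intro v hv
  simp only [pvDigits] at hv
  fin_cases hv <;> decide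

lemma char_add_B : ∀ v ∈ pvDigits, v ≠ 'Z' → base26_add ['B'] [v] = [pvEnc (pvDec v + 1)] := by
  intro v hv hne
  simp only [pvDigits] at hv
  fin_cases hv <;> first | decide | exact absurd rfl hne

lemma char_enc_dec : ∀ v ∈ pvDigits, pvEnc (pvDec v) = v := by
  intro v hv
  simp only [pvDigits] at hv
  fin_cases hv <;> decide

lemma char_dec_ne : ∀ v ∈ pvDigits, v ≠ 'Z' → pvDec v ≠ 25 := by
  intro v hv hne
  simp only [pvDigits] at hv
  fin_cases hv <;> first | decide | exact absurd rfl hne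

lemma enc_dec_map (l : List Char) (h : ∀ v ∈ l, v ∈ pvDigits) :
    l.map (fun w => pvEnc (pvDec w)) = l := by
  induction l with
  | nil => rfl
  | cons v rest ih =>
    have hv : pvEnc (pvDec v) = v := char_enc_dec v (h v (List.mem_cons_self ..))
    simp [hv, ih (fun w hw => h w (List.mem_cons_of_mem _ hw))]

lemma bump_run (l : List Char) (h : ∀ v ∈ l, v ∈ pvDigits) :
    (pvBump (l.map pvDec)).1.map pvEnc = (pvRun 'B' l).1 ∧
    (pvBump (l.map pvDec)).2 = ((pvRun 'B' l).2 == 'A') := by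
  induction l with
  | nil => exact ⟨rfl, rfl⟩
  | cons v rest ih =>
    have hv := h v (List.mem_cons_self ..)
    have hrest := fun w hw => h w (List.mem_cons_of_mem _ hw)
    obtain ⟨ih1, ih2⟩ := ih hrest
    by_cases hz : v = 'Z'
    · subst hz
      have hd : pvDec 'Z' = 25 := by decide
      constructor
      · rw [List.map_cons, hd]
        simpa [pvBump, pvRun, show pvEnc 0 = 'A' from rfl] using ih1
      · rw [List.map_cons, hd]
        simpa [pvBump, pvRun] using ih2
    · have hd : pvDec v ≠ 25 := char_dec_ne v hv hz
      have hmap : rest.map (fun w => pvEnc (pvDec w)) = rest := enc_dec_map rest hrest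
      constructor
      · simp only [List.map_cons, pvBump, hd, pvRun, hz]
        simp [pvRun_A, List.map_map, Function.comp_def, hmap]
      · simp [pvBump, pvRun, hd, hz, pvRun_A]

lemma foldA (l : List Char) : ∀ (k : Int) (L : Nat) (acc : List Char) (carry : Char),
    (carry = 'A' ∨ carry = 'B') → (∀ v ∈ l, v ∈ pvDigits) → k + l.length = L →
    (PySem.List.enumerate l k).foldl (stepA L) (acc, carry) =
      (acc ++ (pvRun carry l).1 ++ (if (pvRun carry l).2 = 'B' ∧ l ≠ [] then ['A'] else []),
       (pvRun carry l).2) := by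
  induction l with
  | nil => intro k L acc carry _ _ _; simp [PySem.List.enumerate_nil, pvRun]
  | cons v rest ih =>
    intro k L acc carry hcar hmem hk
    have hv := hmem v (List.mem_cons_self ..)
    have hrest := fun w hw => hmem w (List.mem_cons_of_mem _ hw)
    rw [PySem.List.enumerate_cons, List.foldl_cons]
    rcases hcar with hA | hB
    · -- carry = 'A': copy v, stay at 'A'
      subst hA
      have hsum : base26_add ['A'] [v] = [v] := char_add_A v hv
      have hstep : stepA L (acc, 'A') (k, v) = (acc ++ [v], 'A') := by
        simp [stepA, hsum, PySem.List.pyGet?, PySem.List.pyIdx?]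
      rw [hstep, ih (k + 1) L (acc ++ [v]) 'A' (Or.inl rfl) hrest (by simp at hk ⊢; omega)]
      rw [pvRun_A, show pvRun 'A' (v :: rest) = (v :: rest, 'A') from pvRun_A _]
      simp
    · subst hB
      by_cases hz : v = 'Z'
      · -- carry 'B', v = 'Z': emit 'A', keep carry 'B'
        subst hz
        have hsum : base26_add ['B'] ['Z'] = ['B', 'A'] := by decide
        rcases List.eq_nil_or_concat rest with hrnil | _
        · subst hrnil
          have hkL : k = (L : Int) - 1 := by simp at hk; omega
          have hstep : stepA L (acc, 'B') (k, 'Z') = (acc ++ ['A'] ++ ['A'], 'B') := by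
            simp [stepA, hsum, PySem.List.pyGet?, PySem.List.pyIdx?, hkL]
          rw [hstep]
          simp [PySem.List.enumerate_nil, pvRun]
        · have hrne : rest ≠ [] := by rename_i hcat; obtain ⟨_, _, rfl⟩ := hcat; simp
          have hkL : k ≠ (L : Int) - 1 := by
            have : rest.length ≠ 0 := by simpa using hrne
            simp at hk; omega
          have hstep : stepA L (acc, 'B') (k, 'Z') = (acc ++ ['A'], 'B') := by
            simp [stepA, hsum, PySem.List.pyGet?, PySem.List.pyIdx?, hkL]
          rw [hstep, ih (k + 1) L (acc ++ ['A']) 'B' (Or.inr rfl) hrest (by simp at hk ⊢; omega)]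
          have hrun : pvRun 'B' ('Z' :: rest) = ('A' :: (pvRun 'B' rest).1, (pvRun 'B' rest).2) := by
            simp [pvRun]
          rw [hrun]
          simp [hrne]
      · -- carry 'B', v ≠ 'Z': bump v, carry becomes 'A'
        have hsum : base26_add ['B'] [v] = [pvEnc (pvDec v + 1)] := char_add_B v hv hz
        have hstep : stepA L (acc, 'B') (k, v) = (acc ++ [pvEnc (pvDec v + 1)], 'A') := by
          simp [stepA, hsum, PySem.List.pyGet?, PySem.List.pyIdx?]
        rw [hstep, ih (k + 1) L _ 'A' (Or.inl rfl) hrest (by simp at hk ⊢; omega)]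
        rw [pvRun_A]
        have hrun : pvRun 'B' (v :: rest) =
            (pvEnc (pvDec v + 1) :: (pvRun 'A' rest).1, (pvRun 'A' rest).2) := by
          simp [pvRun, hz]
        rw [hrun, pvRun_A]
        simp

-- ===== VERDICT (by name: the statement is the Claim_ definition above) =====
theorem next_code_spec : Claim_equal_next_code := by
  intro before _ hpre
  unfold Pre_next_code at hpre
  unfold Spec_next_code
  simp only [next_code, next_code_alt]
  have hmem : ∀ v ∈ before.toList.reverse, v ∈ pvDigits := by
    intro v hv
    have hb := List.all_eq_true.mp hpre v (List.mem_reverse.mp hv)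
    simp only [Bool.and_eq_true, decide_eq_true_eq] at hb
    exact mem_pvDigits_of_range v hb.1 hb.2
  by_cases hb : before.toList = []
  · simp [hb, PySem.List.enumerate_nil]
    rfl
  · have hne : before.toList.reverse ≠ [] := by simp [hb]
    have hbe : (before.toList.map pvDec).isEmpty = false := by
      simp [hb]
    have hrv : (before.toList.map pvDec).reverse = (before.toList.reverse).map pvDec := by
      simp
    rw [foldA _ 0 _ [] 'B' (Or.inr rfl) hmem (by simp)]
    obtain ⟨hb1, hb2⟩ := bump_run _ hmem
    have henc : pvEncode ((pvBump ((before.toList.map pvDec).reverse)).1.reverse)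
        = (pvRun 'B' (before.toList.reverse)).1.reverse := by
      rw [hrv, pvEncode, List.map_reverse, hb1]
    rcases pvRun_carry 'B' before.toList.reverse with hfc | hfc
    · -- final carry 'B' (all 'Z'): overflow branch
      have hflag : (pvBump ((before.toList.map pvDec).reverse)).2 = false := by
        rw [hrv, hb2, hfc]; rfl
      simp [hbe, hflag, hfc, hne, henc]
    · -- final carry 'A': normal bump
      have hflag : (pvBump ((before.toList.map pvDec).reverse)).2 = true := by
        rw [hrv, hb2, hfc]; rfl
      have hfcB : (pvRun 'B' before.toList.reverse).2 ≠ 'B' := by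
        rw [hfc]; decide
      simp [hbe, hflag, hfcB, henc]
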